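-- pv_equiv track=rewrite | github.com/AbstractEyes/lattice_vocabulary | src/geovocab2/data/prompt/booru_synthesizer.py | parse_gender_tags_count
-- ===== SOURCE A (Python) =====
-- from typing import Optional, Dict, List, Set, Union, Iterator, Tuple
--
-- GENDER_COUNT_TAGS = {
--     # (tag, count, category)
--     "boys": [
--         ("1boy", 1), ("2boys", 2), ("3boys", 3), ("4boys", 4), ("5boys", 5), ("6+boys", 6),
--     ],
--     "girls": [
--         ("1girl", 1), ("2girls", 2), ("3girls", 3), ("4girls", 4), ("5girls", 5), ("6+girls", 6),
--     ],
--     "futas": [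
--         ("1futa", 1), ("2futas", 2), ("3futas", 3), ("4futas", 4), ("5futas", 5), ("6+futas", 6),
--     ],
--     "others": [
--         ("1other", 1), ("2others", 2), ("3others", 3), ("4others", 4), ("5others", 5), ("6+others", 6),
--     ],
--     "ambiguous": [
--         ("1ambiguous", 1), ("2ambiguous", 2), ("3ambiguous", 3), ("4ambiguous", 4), ("5ambiguous", 5),
--         ("6+ambiguous", 6),
--     ],
-- }
--
-- def parse_gender_tags_count(tags: List[str]) -> int:
--     """
--     Parse gender tags and return total people count.
--
--     Args:
--         tags: List of tags that may include gender tags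
--
--     Returns:
--         Total count of people
--     """
--     total = 0
--
--     for tag in tags:
--         tag_lower = tag.lower().strip()
--
--         # Check numbered tags
--         for category, entries in GENDER_COUNT_TAGS.items():
--             for tag_name, count in entries:
--                 if tag_lower == tag_name.lower():
--                     total += count
--                     break
--
--         # Check singular non-numbered tags
--         if tag_lower in ["boy", "man", "male", "mature male"]:
--             total += 1
--         elif tag_lower in ["girl", "woman", "female", "mature female"]:
--             total += 1
--         elif tag_lower in ["futanari", "futa", "herm", "intersex"]:
--             total += 1
--         elif tag_lower in ["femboy", "trap", "otoko no ko", "girly"]: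
--             total += 1
--
--     return total
-- ===== SOURCE B (Python) =====
-- from typing import List
--
-- # Instead of any table of numbered tags, B PARSES each normalized tag:
-- # a "6+" prefix or a leading digit 1-5 followed by the matching (plural for >=2,
-- # singular for 1) people noun yields that number; otherwise a known bare
-- # singular-person tag yields 1; anything else yields 0.
-- _SINGULAR_NOUNS = ["boy", "girl", "futa", "other", "ambiguous"]
-- _PLURAL_NOUNS = ["boys", "girls", "futas", "others", "ambiguous"]
-- _ONE_PERSON_TAGS = [
--     "boy", "man", "male", "mature male",
--     "girl", "woman", "female", "mature female",
--     "futanari", "futa", "herm", "intersex",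
--     "femboy", "trap", "otoko no ko", "girly",
-- ]
--
-- def _tag_count(t: str) -> int:
--     if t.startswith("6+"):
--         return 6 if t[2:] in _PLURAL_NOUNS else 0
--     if t and t[0] in "12345":
--         n = ord(t[0]) - 48
--         rest = t[1:]
--         return n if rest in (_SINGULAR_NOUNS if n == 1 else _PLURAL_NOUNS) else 0
--     return 1 if t in _ONE_PERSON_TAGS else 0
--
-- def parse_gender_tags_count(tags: List[str]) -> int:
--     return sum(_tag_count(t.lower().strip()) for t in tags)
-- ===== Notes on version B (the rewrite author's own statement) =====
-- stated objective: alternative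
-- what changed: B parses each normalized tag (leading '1'-'5' digit or '6+' prefix plus the matching singular/plural people noun) to compute the count arithmetically, instead of A's nested scan over five category lists of numbered tags plus an if/elif membership ladder.
import Mathlib
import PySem

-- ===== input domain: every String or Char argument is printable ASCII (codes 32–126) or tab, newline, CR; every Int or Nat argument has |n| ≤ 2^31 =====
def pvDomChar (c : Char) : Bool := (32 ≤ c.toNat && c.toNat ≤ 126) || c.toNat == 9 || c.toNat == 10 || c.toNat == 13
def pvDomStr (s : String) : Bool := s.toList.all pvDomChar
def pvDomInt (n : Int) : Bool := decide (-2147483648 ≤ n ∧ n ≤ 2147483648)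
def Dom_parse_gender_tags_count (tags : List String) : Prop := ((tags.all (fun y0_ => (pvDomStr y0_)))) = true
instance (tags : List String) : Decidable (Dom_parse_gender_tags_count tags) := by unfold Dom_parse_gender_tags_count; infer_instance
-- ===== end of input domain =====

-- B replaces A's fixed table of 30 numbered tags and its nested category scan by PARSING each
-- normalized tag (numeric prefix "1".."5"/"6+" plus the matching people noun); objective: alternative.

-- ===== PORT A =====
def pvGenderCountTags : List (String × List (String × Int)) := [
    ("boys", [("1boy", 1), ("2boys", 2), ("3boys", 3), ("4boys", 4), ("5boys", 5), ("6+boys", 6)]),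
    ("girls", [("1girl", 1), ("2girls", 2), ("3girls", 3), ("4girls", 4), ("5girls", 5), ("6+girls", 6)]),
    ("futas", [("1futa", 1), ("2futas", 2), ("3futas", 3), ("4futas", 4), ("5futas", 5), ("6+futas", 6)]),
    ("others", [("1other", 1), ("2others", 2), ("3others", 3), ("4others", 4), ("5others", 5), ("6+others", 6)]),
    ("ambiguous", [("1ambiguous", 1), ("2ambiguous", 2), ("3ambiguous", 3), ("4ambiguous", 4), ("5ambiguous", 5), ("6+ambiguous", 6)])]

-- inner 'for tag_name, count in entries: if tag_lower == tag_name.lower(): total += count; break'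
def pvFirstCount (t : String) : List (String × Int) → Int
  | [] => 0
  | (name, c) :: rest => if t = PySem.Str.lower name then c else pvFirstCount t rest

def pvStepA (total : Int) (tag : String) : Int :=
  let tag_lower := PySem.Str.strip (PySem.Str.lower tag)
  let total := pvGenderCountTags.foldl (fun acc ce => acc + pvFirstCount tag_lower ce.2) total
  if ["boy", "man", "male", "mature male"].contains tag_lower then total + 1
  else if ["girl", "woman", "female", "mature female"].contains tag_lower then total + 1
  else if ["futanari", "futa", "herm", "intersex"].contains tag_lower then total + 1
  else if ["femboy", "trap", "otoko no ko", "girly"].contains tag_lower then total + 1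
  else total

def parse_gender_tags_count (tags : List String) : Int :=
  tags.foldl pvStepA 0

-- ===== PORT B =====
def pvSingularNouns : List String := ["boy", "girl", "futa", "other", "ambiguous"]
def pvPluralNouns : List String := ["boys", "girls", "futas", "others", "ambiguous"]
def pvOnePersonTags : List String := [
    "boy", "man", "male", "mature male",
    "girl", "woman", "female", "mature female",
    "futanari", "futa", "herm", "intersex",
    "femboy", "trap", "otoko no ko", "girly"]

-- _tag_count(t): parse the normalized tag instead of consulting any table of numbered tags.
-- 't and t[0] in "12345"' is the match on PySem.Str.pyGet? t 0 (a Char; exact since len 1 strings)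
-- plus membership in "12345"'s chars; 'ord(t[0]) - 48' is (c.toNat : Int) - 48 (exact on ASCII);
-- t[2:] and t[1:] are PySem.Str.slice.
def pvTagCount (t : String) : Int :=
  if PySem.Str.startswith t "6+" then
    if pvPluralNouns.contains (PySem.Str.slice t (some 2) none) then 6 else 0
  else
    match PySem.Str.pyGet? t 0 with
    | some c =>
      if ("12345".toList).contains c then
        let n : Int := (c.toNat : Int) - 48
        let rest := PySem.Str.slice t (some 1) none
        if (if n = 1 then pvSingularNouns else pvPluralNouns).contains rest then n else 0
      else if pvOnePersonTags.contains t then 1 else 0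
    | none => if pvOnePersonTags.contains t then 1 else 0

def parse_gender_tags_count_alt (tags : List String) : Int :=
  tags.foldl (fun acc t => acc + pvTagCount (PySem.Str.strip (PySem.Str.lower t))) 0

-- ===== PRECONDITION & SPEC =====
def Spec_parse_gender_tags_count (tags : List String) (out : Int) : Prop := out = parse_gender_tags_count_alt tags
instance (tags : List String) (out : Int) : Decidable (Spec_parse_gender_tags_count tags out) := by unfold Spec_parse_gender_tags_count; infer_instance

-- ===== CLAIM =====
def Claim_equal_parse_gender_tags_count : Prop := ∀ (tags : List String), Dom_parse_gender_tags_count tags → Spec_parse_gender_tags_count tags (parse_gender_tags_count tags)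

-- ===== LEMMAS AND PROOFS =====

-- If s is none of the 46 recognized tag spellings, B's parser yields 0.
set_option maxRecDepth 8000 in
set_option maxHeartbeats 2000000 in
theorem pvTagCount_zero (s : String) (h0 : s ≠ "1boy") (h1 : s ≠ "2boys") (h2 : s ≠ "3boys") (h3 : s ≠ "4boys") (h4 : s ≠ "5boys") (h5 : s ≠ "6+boys") (h6 : s ≠ "1girl") (h7 : s ≠ "2girls") (h8 : s ≠ "3girls") (h9 : s ≠ "4girls") (h10 : s ≠ "5girls") (h11 : s ≠ "6+girls") (h12 : s ≠ "1futa") (h13 : s ≠ "2futas") (h14 : s ≠ "3futas") (h15 : s ≠ "4futas") (h16 : s ≠ "5futas") (h17 : s ≠ "6+futas") (h18 : s ≠ "1other") (h19 : s ≠ "2others") (h20 : s ≠ "3others") (h21 : s ≠ "4others") (h22 : s ≠ "5others") (h23 : s ≠ "6+others") (h24 : s ≠ "1ambiguous") (h25 : s ≠ "2ambiguous") (h26 : s ≠ "3ambiguous") (h27 : s ≠ "4ambiguous") (h28 : s ≠ "5ambiguous") (h29 : s ≠ "6+ambiguous") (h30 : s ≠ "boy") (h31 : s ≠ "man") (h32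 : s ≠ "male") (h33 : s ≠ "mature male") (h34 : s ≠ "girl") (h35 : s ≠ "woman") (h36 : s ≠ "female") (h37 : s ≠ "mature female") (h38 : s ≠ "futanari") (h39 : s ≠ "futa") (h40 : s ≠ "herm") (h41 : s ≠ "intersex") (h42 : s ≠ "femboy") (h43 : s ≠ "trap") (h44 : s ≠ "otoko no ko") (h45 : s ≠ "girly") : pvTagCount s = 0 := by
  unfold pvTagCount
  by_cases hsw : PySem.Str.startswith s "6+" = true
  · rw [if_pos hsw]
    obtain ⟨r, hr⟩ := (PySem.Chars.startswith_iff _ _).mp (by simpa using hsw)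
    by_cases hc : pvPluralNouns.contains (PySem.Str.slice s (some 2) none) = true
    · exfalso
      have hr2 : '6' :: '+' :: r = s.toList := by rw [← hr]; rfl
      have hslice : (PySem.Str.slice s (some 2) none).toList = s.toList.drop 2 := by
        simp [pysem, PySem.List.slice_from]
      have hs : s.toList = '6' :: '+' :: (PySem.Str.slice s (some 2) none).toList := by
        rw [hslice, ← hr2]
        rfl
      have hm : PySem.Str.slice s (some 2) none ∈ pvPluralNouns := by simpa using hc
      simp only [pvPluralNouns, List.mem_cons, List.not_mem_nil, or_false] at hm
      rcases hm with hm | hm | hm | hm | hm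
      · exact h5 (String.toList_injective (by rw [hs, hm]; decide))
      · exact h11 (String.toList_injective (by rw [hs, hm]; decide))
      · exact h17 (String.toList_injective (by rw [hs, hm]; decide))
      · exact h23 (String.toList_injective (by rw [hs, hm]; decide))
      · exact h29 (String.toList_injective (by rw [hs, hm]; decide))
    · have hc' : PySem.Str.slice s (some 2) none ∉ pvPluralNouns := by simpa using hc
      simp [hc']
  · rw [if_neg hsw]
    rcases hsl : s.toList with _ | ⟨c, t⟩
    · -- empty string: pyGet? is none
      have hemp : s = "" := String.toList_injective (by rw [hsl]; rfl)
      subst hemp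
      decide
    · have hg : PySem.Str.pyGet? s 0 = some c := by
        have hq : PySem.Str.pyGet? s ((0 : Nat) : Int) = s.toList[(0 : Nat)]? := PySem.Str.pyGet?_natCast s 0
        simpa [hsl] using hq
      rw [hg]
      have hrest : (PySem.Str.slice s (some 1) none).toList = t := by
        simp [pysem, PySem.List.slice_from, hsl]
      have hs : ∀ u : String, (PySem.Str.slice s (some 1) none) = u → s.toList = c :: u.toList := by
        intro u hu; rw [hsl, ← hu, hrest]
      by_cases hdig : ("12345".toList).contains c = true
      · have hcm : c ∈ ("12345".toList) := by simpa using hdig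
        rw [show ("12345".toList) = ['1','2','3','4','5'] from by decide] at hcm
        simp only [List.mem_cons, List.not_mem_nil, or_false] at hcm
        simp only [hdig, if_true]
        rcases hcm with rfl | rfl | rfl | rfl | rfl
        · -- c = '1'
          by_cases hin : (PySem.Str.slice s (some 1) none) ∈ pvSingularNouns
          · exfalso
            simp only [pvSingularNouns, List.mem_cons, List.not_mem_nil, or_false] at hin
            rcases hin with hm | hm | hm | hm | hm
            · exact h0 (String.toList_injective (by rw [hs _ hm]; decide))
            · exact h6 (String.toList_injective (by rw [hs _ hm]; decide))
            · exact h12 (String.toList_injective (by rw [hs _ hm]; decide))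
            · exact h18 (String.toList_injective (by rw [hs _ hm]; decide))
            · exact h24 (String.toList_injective (by rw [hs _ hm]; decide))
          · simp [hin]
        · -- c = '2'
          by_cases hin : (PySem.Str.slice s (some 1) none) ∈ pvPluralNouns
          · exfalso
            simp only [pvPluralNouns, List.mem_cons, List.not_mem_nil, or_false] at hin
            rcases hin with hm | hm | hm | hm | hm
            · exact h1 (String.toList_injective (by rw [hs _ hm]; decide))
            · exact h7 (String.toList_injective (by rw [hs _ hm]; decide))
            · exact h13 (String.toList_injective (by rw [hs _ hm]; decide))
            · exact h19 (String.toList_injective (by rw [hs _ hm]; decide))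
            · exact h25 (String.toList_injective (by rw [hs _ hm]; decide))
          · simp [hin]
        · -- c = '3'
          by_cases hin : (PySem.Str.slice s (some 1) none) ∈ pvPluralNouns
          · exfalso
            simp only [pvPluralNouns, List.mem_cons, List.not_mem_nil, or_false] at hin
            rcases hin with hm | hm | hm | hm | hm
            · exact h2 (String.toList_injective (by rw [hs _ hm]; decide))
            · exact h8 (String.toList_injective (by rw [hs _ hm]; decide))
            · exact h14 (String.toList_injective (by rw [hs _ hm]; decide))
            · exact h20 (String.toList_injective (by rw [hs _ hm]; decide))
            · exact h26 (String.toList_injective (by rw [hs _ hm]; decide))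
          · simp [hin]
        · -- c = '4'
          by_cases hin : (PySem.Str.slice s (some 1) none) ∈ pvPluralNouns
          · exfalso
            simp only [pvPluralNouns, List.mem_cons, List.not_mem_nil, or_false] at hin
            rcases hin with hm | hm | hm | hm | hm
            · exact h3 (String.toList_injective (by rw [hs _ hm]; decide))
            · exact h9 (String.toList_injective (by rw [hs _ hm]; decide))
            · exact h15 (String.toList_injective (by rw [hs _ hm]; decide))
            · exact h21 (String.toList_injective (by rw [hs _ hm]; decide))
            · exact h27 (String.toList_injective (by rw [hs _ hm]; decide))
          · simp [hin]
        · -- c = '5'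
          by_cases hin : (PySem.Str.slice s (some 1) none) ∈ pvPluralNouns
          · exfalso
            simp only [pvPluralNouns, List.mem_cons, List.not_mem_nil, or_false] at hin
            rcases hin with hm | hm | hm | hm | hm
            · exact h4 (String.toList_injective (by rw [hs _ hm]; decide))
            · exact h10 (String.toList_injective (by rw [hs _ hm]; decide))
            · exact h16 (String.toList_injective (by rw [hs _ hm]; decide))
            · exact h22 (String.toList_injective (by rw [hs _ hm]; decide))
            · exact h28 (String.toList_injective (by rw [hs _ hm]; decide))
          · simp [hin]
      · simp only [hdig, Bool.false_eq_true, if_false]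
        by_cases ho : pvOnePersonTags.contains s = true
        · exfalso
          have hm : s ∈ pvOnePersonTags := by simpa using ho
          simp only [pvOnePersonTags, List.mem_cons, List.not_mem_nil, or_false] at hm
          rcases hm with hm | hm | hm | hm | hm | hm | hm | hm | hm | hm | hm | hm | hm | hm | hm | hm
          · exact h30 hm
          · exact h31 hm
          · exact h32 hm
          · exact h33 hm
          · exact h34 hm
          · exact h35 hm
          · exact h36 hm
          · exact h37 hm
          · exact h38 hm
          · exact h39 hm
          · exact h40 hm
          · exact h41 hm
          · exact h42 hm
          · exact h43 hm
          · exact h44 hm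
          · exact h45 hm
        · have ho' : s ∉ pvOnePersonTags := by simpa using ho
          simp [ho']

-- Per-normalized-tag agreement: the numbered-category contributions plus the singular
-- ladder contribution equal B's parsed count (case split over the 46 recognized spellings).
set_option maxRecDepth 8000 in
set_option maxHeartbeats 2000000 in
theorem pv_contrib_eq (s : String) :
    ((pvGenderCountTags.map (fun ce => pvFirstCount s ce.2)).sum +
      (if ["boy", "man", "male", "mature male"].contains s then (1 : Int)
       else if ["girl", "woman", "female", "mature female"].contains s then 1
       else if ["futanari", "futa", "herm", "intersex"].contains s then 1
       else if ["femboy", "trap", "otoko no ko", "girly"].contains s then 1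
       else 0)) = pvTagCount s := by
  by_cases h0 : s = "1boy"
  · subst h0; decide
  by_cases h1 : s = "2boys"
  · subst h1; decide
  by_cases h2 : s = "3boys"
  · subst h2; decide
  by_cases h3 : s = "4boys"
  · subst h3; decide
  by_cases h4 : s = "5boys"
  · subst h4; decide
  by_cases h5 : s = "6+boys"
  · subst h5; decide
  by_cases h6 : s = "1girl"
  · subst h6; decide
  by_cases h7 : s = "2girls"
  · subst h7; decide
  by_cases h8 : s = "3girls"
  · subst h8; decide
  by_cases h9 : s = "4girls"
  · subst h9; decide
  by_cases h10 : s = "5girls"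
  · subst h10; decide
  by_cases h11 : s = "6+girls"
  · subst h11; decide
  by_cases h12 : s = "1futa"
  · subst h12; decide
  by_cases h13 : s = "2futas"
  · subst h13; decide
  by_cases h14 : s = "3futas"
  · subst h14; decide
  by_cases h15 : s = "4futas"
  · subst h15; decide
  by_cases h16 : s = "5futas"
  · subst h16; decide
  by_cases h17 : s = "6+futas"
  · subst h17; decide
  by_cases h18 : s = "1other"
  · subst h18; decide
  by_cases h19 : s = "2others"
  · subst h19; decide
  by_cases h20 : s = "3others"
  · subst h20; decide
  by_cases h21 : s = "4others"
  · subst h21; decide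
  by_cases h22 : s = "5others"
  · subst h22; decide
  by_cases h23 : s = "6+others"
  · subst h23; decide
  by_cases h24 : s = "1ambiguous"
  · subst h24; decide
  by_cases h25 : s = "2ambiguous"
  · subst h25; decide
  by_cases h26 : s = "3ambiguous"
  · subst h26; decide
  by_cases h27 : s = "4ambiguous"
  · subst h27; decide
  by_cases h28 : s = "5ambiguous"
  · subst h28; decide
  by_cases h29 : s = "6+ambiguous"
  · subst h29; decide
  by_cases h30 : s = "boy"
  · subst h30; decide
  by_cases h31 : s = "man"
  · subst h31; decide
  by_cases h32 : s = "male"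
  · subst h32; decide
  by_cases h33 : s = "mature male"
  · subst h33; decide
  by_cases h34 : s = "girl"
  · subst h34; decide
  by_cases h35 : s = "woman"
  · subst h35; decide
  by_cases h36 : s = "female"
  · subst h36; decide
  by_cases h37 : s = "mature female"
  · subst h37; decide
  by_cases h38 : s = "futanari"
  · subst h38; decide
  by_cases h39 : s = "futa"
  · subst h39; decide
  by_cases h40 : s = "herm"
  · subst h40; decide
  by_cases h41 : s = "intersex"
  · subst h41; decide
  by_cases h42 : s = "femboy"
  · subst h42; decide
  by_cases h43 : s = "trap"
  · subst h43; decide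
  by_cases h44 : s = "otoko no ko"
  · subst h44; decide
  by_cases h45 : s = "girly"
  · subst h45; decide
  rw [pvTagCount_zero s h0 h1 h2 h3 h4 h5 h6 h7 h8 h9 h10 h11 h12 h13 h14 h15 h16 h17 h18 h19 h20 h21 h22 h23 h24 h25 h26 h27 h28 h29 h30 h31 h32 h33 h34 h35 h36 h37 h38 h39 h40 h41 h42 h43 h44 h45]
  simp only [pvGenderCountTags, List.map, pvFirstCount,
    show PySem.Str.lower "1boy" = "1boy" from by decide,
    show PySem.Str.lower "2boys" = "2boys" from by decide,
    show PySem.Str.lower "3boys" = "3boys" from by decide,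
    show PySem.Str.lower "4boys" = "4boys" from by decide,
    show PySem.Str.lower "5boys" = "5boys" from by decide,
    show PySem.Str.lower "6+boys" = "6+boys" from by decide,
    show PySem.Str.lower "1girl" = "1girl" from by decide,
    show PySem.Str.lower "2girls" = "2girls" from by decide,
    show PySem.Str.lower "3girls" = "3girls" from by decide,
    show PySem.Str.lower "4girls" = "4girls" from by decide,
    show PySem.Str.lower "5girls" = "5girls" from by decide,
    show PySem.Str.lower "6+girls" = "6+girls" from by decide,
    show PySem.Str.lower "1futa" = "1futa" from by decide,
    show PySem.Str.lower "2futas" = "2futas" from by decide,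
    show PySem.Str.lower "3futas" = "3futas" from by decide,
    show PySem.Str.lower "4futas" = "4futas" from by decide,
    show PySem.Str.lower "5futas" = "5futas" from by decide,
    show PySem.Str.lower "6+futas" = "6+futas" from by decide,
    show PySem.Str.lower "1other" = "1other" from by decide,
    show PySem.Str.lower "2others" = "2others" from by decide,
    show PySem.Str.lower "3others" = "3others" from by decide,
    show PySem.Str.lower "4others" = "4others" from by decide,
    show PySem.Str.lower "5others" = "5others" from by decide,
    show PySem.Str.lower "6+others" = "6+others" from by decide,
    show PySem.Str.lower "1ambiguous" = "1ambiguous" from by decide,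
    show PySem.Str.lower "2ambiguous" = "2ambiguous" from by decide,
    show PySem.Str.lower "3ambiguous" = "3ambiguous" from by decide,
    show PySem.Str.lower "4ambiguous" = "4ambiguous" from by decide,
    show PySem.Str.lower "5ambiguous" = "5ambiguous" from by decide,
    show PySem.Str.lower "6+ambiguous" = "6+ambiguous" from by decide]
  simp [h0, h1, h2, h3, h4, h5, h6, h7, h8, h9, h10, h11, h12, h13, h14, h15, h16, h17, h18, h19, h20, h21, h22, h23, h24, h25, h26, h27, h28, h29, h30, h31, h32, h33, h34, h35, h36, h37, h38, h39, h40, h41, h42, h43, h44, h45]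

-- A's per-tag step adds exactly B's parsed count.
set_option maxHeartbeats 2000000 in
theorem pvStep_eq (total : Int) (tag : String) :
    pvStepA total tag = total + pvTagCount (PySem.Str.strip (PySem.Str.lower tag)) := by
  have h := pv_contrib_eq (PySem.Str.strip (PySem.Str.lower tag))
  simp only [pvStepA, PySem.List.foldl_add (a := total)]
  split_ifs at h ⊢ <;> omega

theorem pv_foldl_ext {α : Type} (f g : Int → α → Int) (h : ∀ a x, f a x = g a x) :
    ∀ (l : List α) (t : Int), l.foldl f t = l.foldl g t := by
  intro l
  induction l with
  | nil => intro t; rfl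
  | cons x xs ih => intro t; rw [List.foldl_cons, List.foldl_cons, h]; exact ih _

-- ===== VERDICT =====
set_option maxHeartbeats 2000000 in
theorem parse_gender_tags_count_spec : Claim_equal_parse_gender_tags_count := by
  intro tags _
  unfold Spec_parse_gender_tags_count parse_gender_tags_count parse_gender_tags_count_alt
  exact pv_foldl_ext pvStepA _ pvStep_eq tags 0
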